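-- pv_equiv track=rewrite | github.com/xl666/recursosEstructuras24 | parcial2/estudiantes/Amacalli/Parcial2_SEC/listaRepetida_Recursiva.py | todos_repetidos_rec
-- ===== SOURCE A (Python) =====
-- def todos_repetidos_rec(lista: list, acumulador, resultado) -> bool:
--     if not lista:
--         return resultado
--     frente = lista[0]
--     resto = lista[1:]
--     resultado_parcial = False
--     if frente in resto:
--         resultado_parcial = True
--     if frente in acumulador:
--         resultado_parcial = True
--     acumulador.append(frente)
--     return todos_repetidos_rec(resto, acumulador, resultado_parcial and resultado)
-- ===== SOURCE B (Python) =====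
-- def todos_repetidos_rec(lista: list, acumulador, resultado) -> bool:
--     # Iterative single pass over a pre-built frequency table instead of recursion
--     # with repeated membership scans. Same append side-effect on acumulador.
--     cuenta = {}
--     for x in lista:
--         cuenta[x] = cuenta.get(x, 0) + 1
--     inicial = set(acumulador)
--     r = resultado
--     for x in lista:
--         r = (cuenta[x] > 1 or x in inicial) and r
--     for x in lista:
--         acumulador.append(x)
--     return r
-- ===== Notes on version B (the rewrite author's own statement) =====
-- stated objective: faster
-- what changed: Replaces the recursion with its O(n^2) per-element 'in resto'/'in acumulador' scans by one pass that pre-builds a frequency dict and a set snapshot of the initial accumulator, then folds the flags into the result with a flat loop.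
import Mathlib
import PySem

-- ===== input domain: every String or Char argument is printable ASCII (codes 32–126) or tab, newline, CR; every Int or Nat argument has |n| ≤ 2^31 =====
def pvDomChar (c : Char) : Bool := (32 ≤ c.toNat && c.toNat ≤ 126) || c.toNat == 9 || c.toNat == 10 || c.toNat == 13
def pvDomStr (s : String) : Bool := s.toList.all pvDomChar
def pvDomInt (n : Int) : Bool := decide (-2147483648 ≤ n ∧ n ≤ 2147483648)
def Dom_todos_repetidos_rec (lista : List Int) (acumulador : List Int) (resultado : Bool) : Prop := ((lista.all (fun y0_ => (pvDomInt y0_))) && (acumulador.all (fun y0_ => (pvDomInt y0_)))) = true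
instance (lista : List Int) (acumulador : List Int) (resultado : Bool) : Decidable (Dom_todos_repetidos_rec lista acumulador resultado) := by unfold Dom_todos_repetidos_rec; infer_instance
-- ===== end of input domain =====

-- B replaces A's recursion with repeated membership scans by one flat pass over a
-- pre-built frequency table (objective: faster). Both Pythons append lista's elements
-- to acumulador in place; the equivalence proved here is about the RETURN value only.

-- ===== PORT A =====
def todos_repetidos_rec (lista : List Int) (acumulador : List Int) (resultado : Bool) : Bool :=
  match lista with
  | [] => resultado
  | frente :: resto =>
    let rp0 : Bool := false
    let rp1 : Bool := if frente ∈ resto then true else rp0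
    let rp2 : Bool := if frente ∈ acumulador then true else rp1
    -- acumulador.append(frente): the recursive call receives acumulador ++ [frente]
    todos_repetidos_rec resto (acumulador ++ [frente]) (rp2 && resultado)

-- ===== PORT B =====
def todos_repetidos_rec_alt (lista : List Int) (acumulador : List Int) (resultado : Bool) : Bool :=
  -- cuenta = {}; for x in lista: cuenta[x] = cuenta.get(x, 0) + 1
  let cuenta : PySem.Dict Int Int :=
    lista.foldl (fun d x => d.insert x (d.getD x 0 + 1)) PySem.Dict.empty
  -- inicial = set(acumulador)
  let inicial : PySem.Set Int := PySem.Set.ofList acumulador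
  -- r = resultado; for x in lista: r = (cuenta[x] > 1 or x in inicial) and r
  -- (the final append loop only mutates acumulador; no effect on the return value)
  lista.foldl (fun r x => (decide (cuenta.getD x 0 > 1) || PySem.Set.contains inicial x) && r) resultado

-- ===== PRECONDITION & SPEC =====
def Spec_todos_repetidos_rec (lista : List Int) (acumulador : List Int) (resultado : Bool) (out : Bool) : Prop := out = todos_repetidos_rec_alt lista acumulador resultado
instance (lista : List Int) (acumulador : List Int) (resultado : Bool) (out : Bool) : Decidable (Spec_todos_repetidos_rec lista acumulador resultado out) := by unfold Spec_todos_repetidos_rec; infer_instance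

-- ===== CLAIM (what is proved, stated in full; the proofs are below) =====
def Claim_equal_todos_repetidos_rec : Prop := ∀ (lista : List Int) (acumulador : List Int) (resultado : Bool), Dom_todos_repetidos_rec lista acumulador resultado → Spec_todos_repetidos_rec lista acumulador resultado (todos_repetidos_rec lista acumulador resultado)

-- ===== LEMMAS AND PROOFS =====

-- Bool.all congruence over the same list
theorem pv_all_congr {α : Type} {l : List α} {p q : α → Bool}
    (h : ∀ x ∈ l, p x = q x) : l.all p = l.all q := by
  induction l with
  | nil => rfl
  | cons a t ih =>
    simp only [List.all_cons, h a (List.mem_cons_self ..),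
      ih (fun x hx => h x (List.mem_cons_of_mem _ hx))]

-- B's flat loop computes resultado && lista.all p
theorem pv_foldl_and {p : Int → Bool} :
    ∀ (l : List Int) (r : Bool), l.foldl (fun r x => p x && r) r = (r && l.all p) := by
  intro l
  induction l with
  | nil => intro r; simp
  | cons a t ih =>
    intro r
    rw [List.foldl_cons, ih, List.all_cons]
    ac_rfl

-- A's recursion computes resultado && "every element is repeated in lista or already in acumulador"
theorem pv_A_char :
    ∀ (l acc : List Int) (r : Bool),
      todos_repetidos_rec l acc r
        = (r && l.all (fun x => decide (1 < l.count x) || decide (x ∈ acc))) := by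
  intro l
  induction l with
  | nil => intro acc r; simp [todos_repetidos_rec]
  | cons f resto ih =>
    intro acc r
    simp only [todos_repetidos_rec]
    rw [ih]
    have hall : resto.all (fun x => decide (1 < resto.count x) || decide (x ∈ acc ++ [f]))
        = resto.all (fun x => decide (1 < (f :: resto).count x) || decide (x ∈ acc)) := by
      apply pv_all_congr
      intro x hx
      by_cases hxf : x = f
      · subst hxf
        have h2 : 1 < (x :: resto).count x := by
          have := List.count_pos_iff.mpr hx
          rw [List.count_cons_self]; omega
        rw [decide_eq_true h2]
        simp
      · have hcnt : (f :: resto).count x = resto.count x := by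
          simp [Ne.symm hxf]
        have hm : (x ∈ acc ++ [f]) ↔ (x ∈ acc) := by simp [hxf]
        rw [hcnt]
        simp [hm]
    rw [hall]
    have hhead : ((if f ∈ acc then true else if f ∈ resto then true else false) : Bool)
        = (decide (1 < (f :: resto).count f) || decide (f ∈ acc)) := by
      have hc : (1 < (f :: resto).count f) ↔ f ∈ resto := by
        rw [List.count_cons_self]
        constructor
        · intro h; exact List.count_pos_iff.mp (by omega)
        · intro h; have := List.count_pos_iff.mpr h; omega
      by_cases h1 : f ∈ acc <;> by_cases h2 : f ∈ resto <;> simp [h1, h2]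
    rw [hhead]
    simp only [List.all_cons]
    cases r <;> cases (decide (1 < (f :: resto).count f) || decide (f ∈ acc)) <;> simp

-- ===== VERDICT (by name: the statement is the Claim_ definition above) =====
theorem todos_repetidos_rec_spec : Claim_equal_todos_repetidos_rec := by
  intro lista acumulador resultado _
  unfold Spec_todos_repetidos_rec todos_repetidos_rec_alt
  rw [pv_A_char, PySem.Dict.foldl_insert_getD_add_one_eq_counter, pv_foldl_and]
  congr 1
  apply pv_all_congr
  intro x _
  rw [PySem.Dict.getD_counter]
  simp [PySem.Set.mem_ofList]
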